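-- pv_equiv track=rewrite | github.com/Alpha9304/databases-final-project | csv_to_sql.py | parse_facility_details
-- ===== SOURCE A (Python) =====
-- def map_indoor_outdoor(facility_list):
--     indoors = "'N'"
--     for item in facility_list:
--         item_lower = item.strip().lower()
--         if 'indoor' in item_lower:
--             indoors = "'Y'"
--             break
--     return indoors
--
-- def parse_facility_details(facility_detail_str):
--     if not facility_detail_str:
--         return "'N'", "'N'", "'N'", "'N'", "'N'"
--     facility_items = [x.strip() for x in facility_detail_str.split(',') if x.strip()]
--     indoors = map_indoor_outdoor(facility_items)
--     members_only = "'Y'" if any('members only' in f.lower() for f in facility_items) else "'N'"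
--     public_events = "'Y'" if any('public events' in f.lower() for f in facility_items) else "'N'"
--     membership_available = "'Y'" if any('membership available' in f.lower() for f in facility_items) else "'N'"
--     handicap_accessible = "'Y'" if any('handicap accessible' in f.lower() for f in facility_items) else "'N'"
--     return indoors, members_only, public_events, membership_available, handicap_accessible
-- ===== SOURCE B (Python) =====
-- def parse_facility_details(facility_detail_str):
--     if not facility_detail_str:
--         return "'N'", "'N'", "'N'", "'N'", "'N'"
--     indoors = members_only = public_events = membership_available = handicap_accessible = "'N'"
--     for part in facility_detail_str.split(','):
--         item = part.strip()
--         if not item: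
--             continue
--         low = item.lower()
--         if 'indoor' in low:
--             indoors = "'Y'"
--         if 'members only' in low:
--             members_only = "'Y'"
--         if 'public events' in low:
--             public_events = "'Y'"
--         if 'membership available' in low:
--             membership_available = "'Y'"
--         if 'handicap accessible' in low:
--             handicap_accessible = "'Y'"
--     return indoors, members_only, public_events, membership_available, handicap_accessible
-- ===== Notes on version B (the rewrite author's own statement) =====
-- stated objective: simpler
-- what changed: Replaces the helper function plus four independent any(...) scans over the item list with a single loop over the split parts that strips, lowercases once and updates all five flags in one accumulating pass.
import Mathlib
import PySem

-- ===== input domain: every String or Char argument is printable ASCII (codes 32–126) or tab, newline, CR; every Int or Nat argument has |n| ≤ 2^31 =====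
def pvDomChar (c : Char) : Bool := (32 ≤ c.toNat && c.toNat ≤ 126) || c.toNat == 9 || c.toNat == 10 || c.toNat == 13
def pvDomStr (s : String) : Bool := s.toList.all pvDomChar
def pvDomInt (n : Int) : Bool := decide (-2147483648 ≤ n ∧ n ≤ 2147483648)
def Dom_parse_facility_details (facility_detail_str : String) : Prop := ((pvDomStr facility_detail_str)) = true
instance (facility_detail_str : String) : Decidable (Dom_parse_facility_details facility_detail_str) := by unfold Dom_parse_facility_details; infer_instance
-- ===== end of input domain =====

-- B replaces the helper call plus four independent `any(...)` scans by one accumulating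
-- pass over the items that maintains all five flags (objective: simpler, one traversal).

-- ===== PORT A =====
def map_indoor_outdoor (facility_list : List String) : String :=
  match facility_list with
  | [] => "'N'"
  | item :: rest =>
      if PySem.Str.isIn "indoor" (PySem.Str.lower (PySem.Str.strip item)) then "'Y'"
      else map_indoor_outdoor rest

def parse_facility_details (facility_detail_str : String) : String × String × String × String × String :=
  if facility_detail_str == "" then ("'N'", "'N'", "'N'", "'N'", "'N'")
  else
    let facility_items := (((PySem.Chars.splitOn facility_detail_str.toList [',']).map String.ofList).filter
        (fun x => PySem.Str.strip x != "")).map PySem.Str.strip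
    let indoors := map_indoor_outdoor facility_items
    let members_only := if facility_items.any (fun f => PySem.Str.isIn "members only" (PySem.Str.lower f)) then "'Y'" else "'N'"
    let public_events := if facility_items.any (fun f => PySem.Str.isIn "public events" (PySem.Str.lower f)) then "'Y'" else "'N'"
    let membership_available := if facility_items.any (fun f => PySem.Str.isIn "membership available" (PySem.Str.lower f)) then "'Y'" else "'N'"
    let handicap_accessible := if facility_items.any (fun f => PySem.Str.isIn "handicap accessible" (PySem.Str.lower f)) then "'Y'" else "'N'"
    (indoors, members_only, public_events, membership_available, handicap_accessible)

-- ===== PORT B =====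
def pvUpdateFlags (st : String × String × String × String × String) (part : String) :
    String × String × String × String × String :=
  let item := PySem.Str.strip part
  if item == "" then st
  else
    let low := PySem.Str.lower item
    (if PySem.Str.isIn "indoor" low then "'Y'" else st.1,
     if PySem.Str.isIn "members only" low then "'Y'" else st.2.1,
     if PySem.Str.isIn "public events" low then "'Y'" else st.2.2.1,
     if PySem.Str.isIn "membership available" low then "'Y'" else st.2.2.2.1,
     if PySem.Str.isIn "handicap accessible" low then "'Y'" else st.2.2.2.2)

def parse_facility_details_alt (facility_detail_str : String) : String × String × String × String × String :=
  if facility_detail_str == "" then ("'N'", "'N'", "'N'", "'N'", "'N'")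
  else
    ((PySem.Chars.splitOn facility_detail_str.toList [',']).map String.ofList).foldl pvUpdateFlags ("'N'", "'N'", "'N'", "'N'", "'N'")

-- ===== PRECONDITION & SPEC =====
def Spec_parse_facility_details (facility_detail_str : String) (out : String × String × String × String × String) : Prop := out = parse_facility_details_alt facility_detail_str
instance (facility_detail_str : String) (out : String × String × String × String × String) : Decidable (Spec_parse_facility_details facility_detail_str out) := by unfold Spec_parse_facility_details; infer_instance

-- ===== CLAIM (what is proved, stated in full; the proofs are below) =====
def Claim_equal_parse_facility_details : Prop := ∀ (facility_detail_str : String), Dom_parse_facility_details facility_detail_str → Spec_parse_facility_details facility_detail_str (parse_facility_details facility_detail_str)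

-- ===== LEMMAS AND PROOFS =====

theorem dw_head {α : Type} (p : α → Bool) (l : List α) (h : 0 < (List.dropWhile p l).length) :
    ¬ p ((List.dropWhile p l)[0]) = true := by
  induction l with
  | nil => simp at h
  | cons a l ih =>
    by_cases hp : p a = true
    · simpa [List.dropWhile, hp] using ih (by simpa [List.dropWhile, hp] using h)
    · simp [List.dropWhile, hp]

theorem dw_idem {α : Type} (p : α → Bool) (l : List α) :
    List.dropWhile p (List.dropWhile p l) = List.dropWhile p l := by
  rw [List.dropWhile_eq_self_iff]
  exact fun h => dw_head p l h

theorem rstrip_prefix (cs : List Char) : PySem.Chars.rstrip cs <+: cs := by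
  simpa [PySem.Chars.rstrip] using (List.dropWhile_suffix (l := cs.reverse) PySem.Chars.isspace).reverse

theorem strip_strip_chars (cs : List Char) :
    PySem.Chars.strip (PySem.Chars.strip cs) = PySem.Chars.strip cs := by
  unfold PySem.Chars.strip
  have hr : ∀ ds : List Char, PySem.Chars.rstrip (PySem.Chars.rstrip ds) = PySem.Chars.rstrip ds := by
    intro ds
    simp [PySem.Chars.rstrip, dw_idem]
  rw [show PySem.Chars.lstrip (PySem.Chars.rstrip (PySem.Chars.lstrip cs)) = PySem.Chars.rstrip (PySem.Chars.lstrip cs) from ?_, hr]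
  set y := PySem.Chars.lstrip cs with hy
  rcases Nat.eq_zero_or_pos (PySem.Chars.rstrip y).length with h0 | hpos
  · rw [List.length_eq_zero_iff] at h0
    rw [h0]; rfl
  · rw [PySem.Chars.lstrip, List.dropWhile_eq_self_iff]
    intro h
    have hpre := rstrip_prefix y
    have hylen : 0 < y.length := lt_of_lt_of_le hpos hpre.length_le
    have h0y : ¬ PySem.Chars.isspace (y[0]'hylen) = true :=
      dw_head PySem.Chars.isspace cs hylen
    have heq : (PySem.Chars.rstrip y)[0]'h = y[0]'hylen := hpre.getElem h
    rw [heq]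
    exact h0y

@[simp] theorem strip_strip (s : String) :
    PySem.Str.strip (PySem.Str.strip s) = PySem.Str.strip s := by
  simp [PySem.Str.strip, strip_strip_chars]

def pvHit (k : String) (x : String) : Bool :=
  (PySem.Str.strip x != "") && PySem.Str.isIn k (PySem.Str.lower (PySem.Str.strip x))

def pvFlag (k v : String) (parts : List String) : String :=
  if parts.any (pvHit k) then "'Y'" else v

theorem pvFlag_cons (k p v : String) (ps : List String) (h : ¬ PySem.Str.strip p = "") :
    pvFlag k (if PySem.Str.isIn k (PySem.Str.lower (PySem.Str.strip p)) then "'Y'" else v) ps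
      = pvFlag k v (p :: ps) := by
  unfold pvFlag
  rw [List.any_cons]
  have hp : pvHit k p = PySem.Str.isIn k (PySem.Str.lower (PySem.Str.strip p)) := by
    simp [pvHit, h]
  rw [hp]
  cases hany : ps.any (pvHit k) <;>
    cases hi : PySem.Str.isIn k (PySem.Str.lower (PySem.Str.strip p)) <;> simp

theorem fold_eq (parts : List String) : ∀ (a b c d e : String),
    parts.foldl pvUpdateFlags (a, b, c, d, e) =
      (pvFlag "indoor" a parts, pvFlag "members only" b parts, pvFlag "public events" c parts,
       pvFlag "membership available" d parts, pvFlag "handicap accessible" e parts) := by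
  induction parts with
  | nil => intro a b c d e; simp [pvFlag]
  | cons p ps ih =>
    intro a b c d e
    simp only [List.foldl_cons, pvUpdateFlags]
    by_cases h : (PySem.Str.strip p == "") = true
    · rw [if_pos h, ih]
      have h' : PySem.Str.strip p = "" := by simpa using h
      simp [pvFlag, pvHit, h']
    · rw [if_neg h, ih]
      have h' : ¬ PySem.Str.strip p = "" := by simpa using h
      rw [pvFlag_cons _ _ _ _ h', pvFlag_cons _ _ _ _ h', pvFlag_cons _ _ _ _ h',
          pvFlag_cons _ _ _ _ h', pvFlag_cons _ _ _ _ h']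

theorem mio_eq (items : List String) :
    map_indoor_outdoor items =
      if items.any (fun f => PySem.Str.isIn "indoor" (PySem.Str.lower (PySem.Str.strip f))) then "'Y'" else "'N'" := by
  induction items with
  | nil => rfl
  | cons item rest ih =>
    rw [show map_indoor_outdoor (item :: rest) = if PySem.Str.isIn "indoor" (PySem.Str.lower (PySem.Str.strip item)) then "'Y'" else map_indoor_outdoor rest from rfl, ih, List.any_cons]
    cases hi : PySem.Str.isIn "indoor" (PySem.Str.lower (PySem.Str.strip item)) <;>
      cases hr : rest.any (fun f => PySem.Str.isIn "indoor" (PySem.Str.lower (PySem.Str.strip f))) <;>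
        simp

theorem any_items (k : String) (parts : List String) (g : String → Bool)
    (hg : ∀ x, g (PySem.Str.strip x) = PySem.Str.isIn k (PySem.Str.lower (PySem.Str.strip x))) :
    ((parts.filter (fun x => PySem.Str.strip x != "")).map PySem.Str.strip).any g
      = parts.any (pvHit k) := by
  rw [List.any_map, List.any_filter]
  refine List.any_congr rfl (fun x => ?_)
  simp only [Function.comp, pvHit, hg x]

theorem any_items_kw (k : String) (parts : List String) :
    ((parts.filter (fun x => PySem.Str.strip x != "")).map PySem.Str.strip).any
        (fun f => PySem.Str.isIn k (PySem.Str.lower f))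
      = parts.any (pvHit k) :=
  any_items k parts _ (fun _ => rfl)

theorem any_items_indoor (parts : List String) :
    ((parts.filter (fun x => PySem.Str.strip x != "")).map PySem.Str.strip).any
        (fun f => PySem.Str.isIn "indoor" (PySem.Str.lower (PySem.Str.strip f)))
      = parts.any (pvHit "indoor") :=
  any_items "indoor" parts _ (fun x => by rw [strip_strip])

-- ===== VERDICT (by name: the statement is the Claim_ definition above) =====
theorem parse_facility_details_spec : Claim_equal_parse_facility_details := by
  intro s _
  by_cases hs : (s == "") = true
  · simp [Spec_parse_facility_details, parse_facility_details, parse_facility_details_alt, hs]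
  · simp only [Spec_parse_facility_details, parse_facility_details, parse_facility_details_alt, hs,
      if_false, Bool.false_eq_true]
    rw [fold_eq, mio_eq]
    rw [any_items_indoor, any_items_kw "members only", any_items_kw "public events",
        any_items_kw "membership available", any_items_kw "handicap accessible"]
    rfl
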